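-- pv_equiv track=rewrite | github.com/antoniovita/puc | simuladoPaula.py | definePraca
-- ===== SOURCE A (Python) =====
-- def definePraca(numTotalPracas, nomeEquipe, pratoPrincipal):
--     valorBase = 0
--     for letra in nomeEquipe:
--         if letra in "aeiouAEIOU":
--             valorBase +=1
--     for letra in pratoPrincipal:
--         if letra in "aeiouAEIOU":
--             valorBase +=1
--     indice = valorBase % numTotalPracas
--     return indice
-- ===== SOURCE B (Python) =====
-- def definePraca(numTotalPracas, nomeEquipe, pratoPrincipal):
--     freq = {}
--     for ch in nomeEquipe + pratoPrincipal:
--         freq[ch] = freq.get(ch, 0) + 1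
--     valorBase = 0
--     for v in "aeiouAEIOU":
--         valorBase += freq.get(v, 0)
--     return valorBase % numTotalPracas
-- ===== Notes on version B (the rewrite author's own statement) =====
-- stated objective: alternative
-- what changed: B builds a character-frequency table over the concatenated strings in one pass and then sums the table entries for the ten vowel characters, instead of A's two per-character loops each testing membership in the vowel string.
import Mathlib
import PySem

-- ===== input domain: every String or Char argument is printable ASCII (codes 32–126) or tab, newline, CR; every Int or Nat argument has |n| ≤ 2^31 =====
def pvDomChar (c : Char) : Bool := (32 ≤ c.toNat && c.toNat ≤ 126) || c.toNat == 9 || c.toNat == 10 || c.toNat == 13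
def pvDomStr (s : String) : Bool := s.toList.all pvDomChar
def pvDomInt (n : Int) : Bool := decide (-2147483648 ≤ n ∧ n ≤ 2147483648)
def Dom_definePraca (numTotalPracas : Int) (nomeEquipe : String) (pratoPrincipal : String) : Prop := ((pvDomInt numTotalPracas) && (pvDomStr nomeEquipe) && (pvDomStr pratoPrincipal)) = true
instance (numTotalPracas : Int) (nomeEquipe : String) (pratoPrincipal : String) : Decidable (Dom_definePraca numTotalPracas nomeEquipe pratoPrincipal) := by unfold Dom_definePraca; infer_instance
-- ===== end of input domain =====

-- B replaces A's two membership-test loops by one frequency-table pass plus a sum over the ten vowel characters (alternative decomposition, same cost class).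


-- ===== PORT A =====
def definePraca (numTotalPracas : Int) (nomeEquipe : String) (pratoPrincipal : String) : Int :=
  let valorBase : Int :=
    nomeEquipe.toList.foldl
      (fun acc letra => if "aeiouAEIOU".toList.contains letra then acc + 1 else acc) 0
  let valorBase : Int :=
    pratoPrincipal.toList.foldl
      (fun acc letra => if "aeiouAEIOU".toList.contains letra then acc + 1 else acc) valorBase
  PySem.Int.mod valorBase numTotalPracas

-- ===== PORT B =====
def definePraca_alt (numTotalPracas : Int) (nomeEquipe : String) (pratoPrincipal : String) : Int :=
  let freq : PySem.Dict Char Int :=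
    (nomeEquipe.toList ++ pratoPrincipal.toList).foldl
      (fun d ch => d.insert ch (d.getD ch 0 + 1)) PySem.Dict.empty
  let valorBase : Int :=
    "aeiouAEIOU".toList.foldl (fun acc v => acc + freq.getD v 0) 0
  PySem.Int.mod valorBase numTotalPracas

-- ===== PRECONDITION & SPEC =====
-- Pre_ excludes numTotalPracas = 0, where A (and B) raise ZeroDivisionError.
def Pre_definePraca (numTotalPracas : Int) (nomeEquipe : String) (pratoPrincipal : String) : Prop :=
  numTotalPracas ≠ 0
instance (numTotalPracas : Int) (nomeEquipe : String) (pratoPrincipal : String) : Decidable (Pre_definePraca numTotalPracas nomeEquipe pratoPrincipal) := by unfold Pre_definePraca; infer_instance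
def pvWitness_definePraca : Int × String × String := (3, "Abc", "feijoada")

def Spec_definePraca (numTotalPracas : Int) (nomeEquipe : String) (pratoPrincipal : String) (out : Int) : Prop := out = definePraca_alt numTotalPracas nomeEquipe pratoPrincipal
instance (numTotalPracas : Int) (nomeEquipe : String) (pratoPrincipal : String) (out : Int) : Decidable (Spec_definePraca numTotalPracas nomeEquipe pratoPrincipal out) := by unfold Spec_definePraca; infer_instance

-- ===== CLAIM (what is proved, stated in full; the proofs are below) =====
def Claim_equal_definePraca : Prop := ∀ (numTotalPracas : Int) (nomeEquipe : String) (pratoPrincipal : String), Dom_definePraca numTotalPracas nomeEquipe pratoPrincipal → Pre_definePraca numTotalPracas nomeEquipe pratoPrincipal → Spec_definePraca numTotalPracas nomeEquipe pratoPrincipal (definePraca numTotalPracas nomeEquipe pratoPrincipal)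

-- ===== LEMMAS AND PROOFS =====

-- A's counting loop is the countP of the vowel predicate.
theorem foldl_vowel_count (l : List Char) (a : Int) :
    l.foldl (fun acc letra => if "aeiouAEIOU".toList.contains letra then acc + 1 else acc) a
      = a + (l.countP (fun c => "aeiouAEIOU".toList.contains c) : Int) := by
  induction l generalizing a with
  | nil => simp
  | cons c l ih =>
    rw [List.foldl_cons, List.countP_cons, ih]
    by_cases h : "aeiouAEIOU".toList.contains c = true
    · rw [if_pos h, if_pos h]; push_cast; ring
    · rw [if_neg h, if_neg h]; push_cast; ring

-- summing the indicator of one character over a list is its count there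
theorem sum_ite_eq_count (c : Char) (vs : List Char) :
    (vs.map (fun v => if c == v then (1 : Int) else 0)).sum = (vs.count c : Int) := by
  induction vs with
  | nil => simp
  | cons w ws ih =>
    rw [List.map_cons, List.sum_cons, ih, List.count_cons]
    by_cases h : c = w
    · subst h; simp; ring
    · rw [if_neg (by simpa using h), if_neg (by simpa using Ne.symm h)]
      push_cast; ring

-- Summing per-character counts over a duplicate-free character list is countP of membership.
theorem sum_counts_eq_countP (vs : List Char) (hvs : vs.Nodup) (l : List Char) :
    (vs.map (fun v => (l.count v : Int))).sum = (l.countP (fun c => vs.contains c) : Int) := by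
  induction l with
  | nil => simp
  | cons c l ih =>
    have hmap : (vs.map (fun v => ((c :: l).count v : Int)))
        = vs.map (fun v => (l.count v : Int) + (if c == v then 1 else 0)) := by
      apply List.map_congr_left
      intro v _
      rw [List.count_cons]
      push_cast; ring
    rw [hmap, List.countP_cons, List.sum_map_add, ih, sum_ite_eq_count]
    by_cases hc : vs.contains c = true
    · rw [List.count_eq_one_of_mem hvs (by simpa using hc), if_pos hc]; push_cast; ring
    · rw [List.count_eq_zero_of_not_mem (by simpa using hc), if_neg hc]; push_cast; ring

-- ===== VERDICT (by name: the statement is the Claim_ definition above) =====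
theorem definePraca_spec : Claim_equal_definePraca := by
  intro n ne pp _ _
  simp only [Spec_definePraca, definePraca, definePraca_alt]
  congr 1
  rw [foldl_vowel_count, foldl_vowel_count, PySem.List.foldl_add]
  have hmap : ("aeiouAEIOU".toList.map
      (fun v => ((ne.toList ++ pp.toList).foldl
        (fun d ch => d.insert ch (d.getD ch 0 + 1)) PySem.Dict.empty).getD v 0))
      = "aeiouAEIOU".toList.map (fun v => ((ne.toList ++ pp.toList).count v : Int)) := by
    apply List.map_congr_left
    intro v _
    rw [PySem.Dict.getD_foldl_insert_add_one]
    simp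
  rw [hmap, sum_counts_eq_countP _ (by decide), List.countP_append]
  push_cast; ring
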